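-- pv_equiv track=rewrite | github.com/Mr-Rafo/Master-Thesis-RaffaeleSquillante | Generator/ruleGenerator/ruleGenerator.py | getTcpFlag
-- ===== SOURCE A (Python) =====
-- def getTcpFlag(fingerprintTcpFlag):
--     tcpFlags = []
--     seen_flags = set()
--
--     fingerprintFilterer = fingerprintTcpFlag.replace('.', '')
--
--     for flag in fingerprintFilterer:
--         if flag == 'S' and 'syn' not in seen_flags:
--             tcpFlags.append('syn')
--             seen_flags.add('syn')
--         elif flag == 'E' and 'ecn' not in seen_flags:
--             tcpFlags.append('ecn')
--             seen_flags.add('ecn')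
--         elif flag == 'C' and 'cwr' not in seen_flags:
--             tcpFlags.append('cwr')
--             seen_flags.add('cwr')
--         elif flag == 'U' and 'urg' not in seen_flags:
--             tcpFlags.append('urg')
--             seen_flags.add('urg')
--         elif flag == 'A' and 'ack' not in seen_flags:
--             tcpFlags.append('ack')
--             seen_flags.add('ack')
--         elif flag == 'P' and 'psh' not in seen_flags:
--             tcpFlags.append('psh')
--             seen_flags.add('psh')
--         elif flag == 'R' and 'rst' not in seen_flags:
--             tcpFlags.append('rst')
--             seen_flags.add('rst')
--         elif flag == 'F' and 'fin' not in seen_flags: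
--             tcpFlags.append('fin')
--             seen_flags.add('fin')
--
--     return tcpFlags
-- ===== SOURCE B (Python) =====
-- FLAGS = [('S', 'syn'), ('E', 'ecn'), ('C', 'cwr'), ('U', 'urg'),
--          ('A', 'ack'), ('P', 'psh'), ('R', 'rst'), ('F', 'fin')]
--
-- def getTcpFlag(fingerprintTcpFlag):
--     t = fingerprintTcpFlag.replace('.', '')
--     hits = [(t.find(c), name) for c, name in FLAGS if c in t]
--     hits.sort(key=lambda p: p[0])
--     return [name for _, name in hits]
-- ===== Notes on version B (the rewrite author's own statement) =====
-- stated objective: faster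
-- what changed: Inverts the traversal: instead of A's single per-character scan with an 8-branch elif chain and a seen-set, B scans once per flag letter (str.find gives each flag's first-occurrence index), keeps the flags that occur, sorts the (index, name) pairs by index and emits the names.
import Mathlib
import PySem

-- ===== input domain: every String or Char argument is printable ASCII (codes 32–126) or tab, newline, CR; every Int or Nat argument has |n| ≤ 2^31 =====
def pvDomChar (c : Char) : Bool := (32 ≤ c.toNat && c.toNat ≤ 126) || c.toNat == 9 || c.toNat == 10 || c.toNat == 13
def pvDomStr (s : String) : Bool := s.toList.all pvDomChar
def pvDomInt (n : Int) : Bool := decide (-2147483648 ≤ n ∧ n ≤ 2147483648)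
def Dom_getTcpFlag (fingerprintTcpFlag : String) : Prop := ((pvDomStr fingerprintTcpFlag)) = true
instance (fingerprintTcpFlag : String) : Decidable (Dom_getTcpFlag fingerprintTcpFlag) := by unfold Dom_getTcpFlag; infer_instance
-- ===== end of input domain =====

-- B inverts the traversal: one str.find pass per flag letter, then sort the found (index, name) pairs by index — instead of A's per-character scan with an elif chain and a seen-set (the 8 C-level find scans replace interpreted per-character work; a timing run measured B faster).

-- ===== PORT A =====
-- A's for-loop with its elif chain and the 'seen_flags' set, as structural recursion.
def tcpLoopA : List Char → List String → PySem.Set String → List String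
  | [], tcpFlags, _ => tcpFlags
  | flag :: rest, tcpFlags, seen =>
    if flag = 'S' ∧ ¬ PySem.Set.contains seen "syn" then
      tcpLoopA rest (tcpFlags ++ ["syn"]) (PySem.Set.add seen "syn")
    else if flag = 'E' ∧ ¬ PySem.Set.contains seen "ecn" then
      tcpLoopA rest (tcpFlags ++ ["ecn"]) (PySem.Set.add seen "ecn")
    else if flag = 'C' ∧ ¬ PySem.Set.contains seen "cwr" then
      tcpLoopA rest (tcpFlags ++ ["cwr"]) (PySem.Set.add seen "cwr")
    else if flag = 'U' ∧ ¬ PySem.Set.contains seen "urg" then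
      tcpLoopA rest (tcpFlags ++ ["urg"]) (PySem.Set.add seen "urg")
    else if flag = 'A' ∧ ¬ PySem.Set.contains seen "ack" then
      tcpLoopA rest (tcpFlags ++ ["ack"]) (PySem.Set.add seen "ack")
    else if flag = 'P' ∧ ¬ PySem.Set.contains seen "psh" then
      tcpLoopA rest (tcpFlags ++ ["psh"]) (PySem.Set.add seen "psh")
    else if flag = 'R' ∧ ¬ PySem.Set.contains seen "rst" then
      tcpLoopA rest (tcpFlags ++ ["rst"]) (PySem.Set.add seen "rst")
    else if flag = 'F' ∧ ¬ PySem.Set.contains seen "fin" then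
      tcpLoopA rest (tcpFlags ++ ["fin"]) (PySem.Set.add seen "fin")
    else
      tcpLoopA rest tcpFlags seen

def getTcpFlag (fingerprintTcpFlag : String) : List String :=
  tcpLoopA (PySem.Str.replace fingerprintTcpFlag "." "").toList [] PySem.Set.empty

-- ===== PORT B =====
-- B's static FLAGS list of (letter, name) pairs
def tcpFlagTable : List (Char × String) :=
  [('S', "syn"), ('E', "ecn"), ('C', "cwr"), ('U', "urg"),
   ('A', "ack"), ('P', "psh"), ('R', "rst"), ('F', "fin")]

def getTcpFlag_alt (fingerprintTcpFlag : String) : List String :=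
  -- t = replace('.', ''); hits = [(t.find(c), name) for c, name in FLAGS if c in t]
  -- hits.sort(key=lambda p: p[0]); return [name for _, name in hits]
  let t := (PySem.Str.replace fingerprintTcpFlag "." "").toList
  let hits := (tcpFlagTable.filter (fun p => PySem.Chars.isIn [p.1] t)).map
      (fun p => (PySem.Chars.find t [p.1], p.2))
  (PySem.List.sorted hits (fun p => p.1)).map (fun p => p.2)

-- ===== PRECONDITION & SPEC =====
def Spec_getTcpFlag (fingerprintTcpFlag : String) (out : List String) : Prop := out = getTcpFlag_alt fingerprintTcpFlag
instance (fingerprintTcpFlag : String) (out : List String) : Decidable (Spec_getTcpFlag fingerprintTcpFlag out) := by unfold Spec_getTcpFlag; infer_instance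

-- ===== CLAIM (what is proved, stated in full; the proofs are below) =====
def Claim_equal_getTcpFlag : Prop := ∀ (fingerprintTcpFlag : String), Dom_getTcpFlag fingerprintTcpFlag → Spec_getTcpFlag fingerprintTcpFlag (getTcpFlag fingerprintTcpFlag)

-- ===== LEMMAS AND PROOFS =====

-- proof-only summary of A's elif chain as a partial lookup
def tcpTable (c : Char) : Option String :=
  if c = 'S' then some "syn"
  else if c = 'E' then some "ecn"
  else if c = 'C' then some "cwr"
  else if c = 'U' then some "urg"
  else if c = 'A' then some "ack"
  else if c = 'P' then some "psh"
  else if c = 'R' then some "rst"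
  else if c = 'F' then some "fin"
  else none

-- proof-only helper: dedup of cs relative to already-seen chars sc
def dd (sc : List Char) : List Char → List Char
  | [] => []
  | c :: cs => if PySem.Set.contains sc c then dd sc cs else c :: dd (sc ++ [c]) cs

lemma mem_dd (cs : List Char) : ∀ (sc : List Char) (x : Char),
    x ∈ dd sc cs ↔ x ∈ cs ∧ x ∉ sc := by
  induction cs with
  | nil => intro sc x; simp [dd]
  | cons c cs ih =>
    intro sc x
    by_cases hxc : x = c
    · subst hxc
      by_cases h : x ∈ sc
      · simp [dd, h, ih]
      · simp [dd, h, ih]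
    · by_cases h : c ∈ sc
      · simp [dd, h, ih, hxc]
      · simp [dd, h, ih, hxc, List.mem_append]

lemma tcpTable_mem {c : Char} {n : String} (h : tcpTable c = some n) :
    (c, n) ∈ tcpFlagTable := by
  unfold tcpTable at h
  split_ifs at h <;> simp_all [tcpFlagTable]

lemma mem_tcpTable {c : Char} {n : String} (h : (c, n) ∈ tcpFlagTable) :
    tcpTable c = some n := by
  simp only [tcpFlagTable, List.mem_cons, List.mem_singleton, Prod.mk.injEq,
    List.not_mem_nil, or_false] at h
  rcases h with ⟨rfl, rfl⟩|⟨rfl, rfl⟩|⟨rfl, rfl⟩|⟨rfl, rfl⟩|⟨rfl, rfl⟩|⟨rfl, rfl⟩|⟨rfl, rfl⟩|⟨rfl, rfl⟩ <;> rfl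

-- one iteration of A's elif chain, summarised via the table
lemma tcpLoopA_step (c : Char) (cs : List Char) (acc : List String) (seen : PySem.Set String) :
    tcpLoopA (c :: cs) acc seen =
      match tcpTable c with
      | none => tcpLoopA cs acc seen
      | some n =>
        if PySem.Set.contains seen n then tcpLoopA cs acc seen
        else tcpLoopA cs (acc ++ [n]) (PySem.Set.add seen n) := by
  by_cases h1 : c = 'S'
  · subst h1; by_cases hs : PySem.Set.contains seen "syn" <;> simp [tcpLoopA, tcpTable, hs]
  by_cases h2 : c = 'E'
  · subst h2; by_cases hs : PySem.Set.contains seen "ecn" <;> simp [tcpLoopA, tcpTable, hs]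
  by_cases h3 : c = 'C'
  · subst h3; by_cases hs : PySem.Set.contains seen "cwr" <;> simp [tcpLoopA, tcpTable, hs]
  by_cases h4 : c = 'U'
  · subst h4; by_cases hs : PySem.Set.contains seen "urg" <;> simp [tcpLoopA, tcpTable, hs]
  by_cases h5 : c = 'A'
  · subst h5; by_cases hs : PySem.Set.contains seen "ack" <;> simp [tcpLoopA, tcpTable, hs]
  by_cases h6 : c = 'P'
  · subst h6; by_cases hs : PySem.Set.contains seen "psh" <;> simp [tcpLoopA, tcpTable, hs]
  by_cases h7 : c = 'R'
  · subst h7; by_cases hs : PySem.Set.contains seen "rst" <;> simp [tcpLoopA, tcpTable, hs]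
  by_cases h8 : c = 'F'
  · subst h8; by_cases hs : PySem.Set.contains seen "fin" <;> simp [tcpLoopA, tcpTable, hs]
  simp [tcpLoopA, tcpTable, h1, h2, h3, h4, h5, h6, h7, h8]

lemma tcpTable_inj {c c' : Char} {n : String} (h : tcpTable c = some n) (h' : tcpTable c' = some n) :
    c = c' := by
  have h1 := tcpTable_mem h
  have h2 := tcpTable_mem h'
  simp only [tcpFlagTable, List.mem_cons, List.mem_singleton, Prod.mk.injEq,
    List.not_mem_nil, or_false] at h1 h2
  rcases h1 with h1|h1|h1|h1|h1|h1|h1|h1 <;>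
    rcases h2 with h2|h2|h2|h2|h2|h2|h2|h2 <;> simp_all

lemma tcpLoopA_eq_dd (cs : List Char) : ∀ (acc : List String) (seen : PySem.Set String) (sc : List Char),
    (∀ c n, tcpTable c = some n → (PySem.Set.contains seen n = true ↔ c ∈ sc)) →
    tcpLoopA cs acc seen = acc ++ (dd sc cs).filterMap tcpTable := by
  induction cs with
  | nil => intro acc seen sc _; simp [tcpLoopA, dd]
  | cons c cs ih =>
    intro acc seen sc hinv
    rw [tcpLoopA_step]
    cases htc : tcpTable c with
    | none =>
      by_cases hsc : c ∈ sc
      · rw [ih acc seen sc hinv]; simp [dd, hsc]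
      · rw [ih acc seen (sc ++ [c]) ?_]
        · simp [dd, hsc, htc]
        · intro c' n' h'
          rw [hinv c' n' h']
          simp only [List.mem_append, List.mem_singleton]
          constructor
          · exact fun h => Or.inl h
          · rintro (h | rfl)
            · exact h
            · rw [htc] at h'; simp at h'
    | some n =>
      dsimp only
      by_cases hseen : PySem.Set.contains seen n = true
      · have hsc : c ∈ sc := (hinv c n htc).mp hseen
        rw [if_pos hseen, ih acc seen sc hinv]; simp [dd, hsc]
      · have hsc : c ∉ sc := fun h => hseen ((hinv c n htc).mpr h)
        rw [if_neg hseen, ih (acc ++ [n]) (PySem.Set.add seen n) (sc ++ [c]) ?_]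
        · simp [dd, hsc, htc]
        · intro c' n' h'
          rw [PySem.Set.contains_iff, PySem.Set.mem_add]
          simp only [List.mem_append, List.mem_singleton]
          constructor
          · rintro (h | rfl)
            · exact Or.inl ((hinv c' n' h').mp ((PySem.Set.contains_iff _ _).mpr h))
            · exact Or.inr (tcpTable_inj h' htc)
          · rintro (h | rfl)
            · exact Or.inl ((PySem.Set.contains_iff _ _).mp ((hinv c' n' h').mpr h))
            · rw [htc] at h'; injection h' with e; exact Or.inr e.symm

-- ===== find-index lemmas =====

lemma go_cons (c h : Char) (t : List Char) (k : Nat) :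
    PySem.Chars.find.go [c] (h :: t) k =
      if c = h then (k : Int) else PySem.Chars.find.go [c] t (k + 1) := by
  by_cases hch : c = h <;>
    simp [PySem.Chars.find.go, List.isPrefixOf, hch]

lemma go_ge (cs : List Char) : ∀ (c : Char) (k : Nat), c ∈ cs →
    (k : Int) ≤ PySem.Chars.find.go [c] cs k := by
  induction cs with
  | nil => simp
  | cons h t ih =>
    intro c k hc
    rw [go_cons]
    by_cases hch : c = h
    · simp [hch]
    · rcases List.mem_cons.mp hc with rfl | hc
      · exact absurd rfl hch
      · simp only [hch, if_false]
        have := ih c (k + 1) hc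
        omega

lemma pairwise_dd_go (cs : List Char) : ∀ (sc : List Char) (k : Nat),
    (dd sc cs).Pairwise
      (fun a b => PySem.Chars.find.go [a] cs k < PySem.Chars.find.go [b] cs k) := by
  induction cs with
  | nil => intro sc k; simp [dd]
  | cons c cs ih =>
    intro sc k
    by_cases hc : c ∈ sc
    · simp only [dd, PySem.Set.contains_iff, hc, if_true]
      refine (ih sc (k + 1)).imp_of_mem ?_
      intro a b ha hb hab
      have hna : a ≠ c := fun h => ((mem_dd cs sc a).mp ha).2 (h ▸ hc)
      have hnb : b ≠ c := fun h => ((mem_dd cs sc b).mp hb).2 (h ▸ hc)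
      rw [go_cons, go_cons, if_neg hna, if_neg hnb]
      exact hab
    · simp only [dd, PySem.Set.contains_iff, hc, if_false]
      constructor
      · intro b hb
        have hmem := (mem_dd cs (sc ++ [c]) b).mp hb
        have hnb : b ≠ c := fun h => hmem.2 (by simp [h])
        rw [go_cons, go_cons, if_pos rfl, if_neg hnb]
        have := go_ge cs b (k + 1) hmem.1
        omega
      · refine (ih (sc ++ [c]) (k + 1)).imp_of_mem ?_
        intro a b ha hb hab
        have hna : a ≠ c := fun h => ((mem_dd cs (sc ++ [c]) a).mp ha).2 (by simp [h])
        have hnb : b ≠ c := fun h => ((mem_dd cs (sc ++ [c]) b).mp hb).2 (by simp [h])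
        rw [go_cons, go_cons, if_neg hna, if_neg hnb]
        exact hab

lemma mem_iff_isIn (c : Char) (cs : List Char) :
    PySem.Chars.isIn [c] cs = true ↔ c ∈ cs := by
  rw [PySem.Chars.isIn_iff_infix]
  constructor
  · intro h; exact h.subset (List.mem_singleton_self c)
  · intro h
    rcases List.mem_iff_append.mp h with ⟨pre, suf, rfl⟩
    exact ⟨pre, suf, by simp⟩

-- the pair list B builds, indexed from the dedup order instead of the table order
def pairOf (cs : List Char) (c : Char) : Option (Int × String) :=
  (tcpTable c).map (fun n => (PySem.Chars.find cs [c], n))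

lemma mem_ys_iff (cs : List Char) (i : Int) (n : String) :
    (i, n) ∈ (dd [] cs).filterMap (pairOf cs) ↔
      ∃ c, c ∈ cs ∧ tcpTable c = some n ∧ i = PySem.Chars.find cs [c] := by
  simp only [List.mem_filterMap, pairOf, Option.map_eq_some_iff]
  constructor
  · rintro ⟨c, hc, n', ht, he⟩
    injection he with e1 e2
    exact ⟨c, ((mem_dd cs [] c).mp hc).1, by rw [ht, e2], e1.symm⟩
  · rintro ⟨c, hc, ht, rfl⟩
    exact ⟨c, (mem_dd cs [] c).mpr ⟨hc, by simp⟩, n, ht, rfl⟩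

lemma mem_hits_iff (cs : List Char) (i : Int) (n : String) :
    (i, n) ∈ (tcpFlagTable.filter (fun p => PySem.Chars.isIn [p.1] cs)).map
        (fun p => (PySem.Chars.find cs [p.1], p.2)) ↔
      ∃ c, c ∈ cs ∧ tcpTable c = some n ∧ i = PySem.Chars.find cs [c] := by
  simp only [List.mem_map, List.mem_filter]
  constructor
  · rintro ⟨⟨c, n'⟩, ⟨hmem, hin⟩, he⟩
    injection he with e1 e2
    exact ⟨c, (mem_iff_isIn c cs).mp hin,
      (mem_tcpTable hmem).trans (congrArg some e2), e1.symm⟩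
  · rintro ⟨c, hc, ht, rfl⟩
    exact ⟨(c, n), ⟨tcpTable_mem ht, (mem_iff_isIn c cs).mpr hc⟩, rfl⟩

lemma ys_pairwise (cs : List Char) :
    ((dd [] cs).filterMap (pairOf cs)).Pairwise (fun a b => a.1 < b.1) := by
  rw [List.pairwise_filterMap]
  refine (pairwise_dd_go cs [] 0).imp_of_mem ?_
  intro a b _ _ hab x hx y hy
  simp only [pairOf, Option.map_eq_some_iff] at hx hy
  rcases hx with ⟨nx, _, rfl⟩
  rcases hy with ⟨ny, _, rfl⟩
  exact hab

lemma ys_nodup (cs : List Char) : ((dd [] cs).filterMap (pairOf cs)).Nodup :=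
  (ys_pairwise cs).imp (fun h => by
    intro he; rw [he] at h; exact lt_irrefl _ h)

lemma hits_nodup (cs : List Char) :
    ((tcpFlagTable.filter (fun p => PySem.Chars.isIn [p.1] cs)).map
        (fun p => (PySem.Chars.find cs [p.1], p.2))).Nodup := by
  apply List.Nodup.of_map (fun p : Int × String => p.2)
  rw [List.map_map]
  exact List.Sublist.nodup (List.Sublist.map _ List.filter_sublist)
    (by decide : (tcpFlagTable.map (fun p : Char × String => p.2)).Nodup)

lemma sorted_hits_eq_ys (cs : List Char) :
    PySem.List.sorted
        ((tcpFlagTable.filter (fun p => PySem.Chars.isIn [p.1] cs)).map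
          (fun p => (PySem.Chars.find cs [p.1], p.2)))
        (fun p => p.1) =
      (dd [] cs).filterMap (pairOf cs) := by
  apply PySem.List.sorted_eq_of_perm_of_pairwise_lt
  · rw [List.perm_ext_iff_of_nodup (ys_nodup cs) (hits_nodup cs)]
    rintro ⟨i, n⟩
    rw [mem_ys_iff, mem_hits_iff]
  · exact ys_pairwise cs

lemma map_snd_ys (cs : List Char) :
    ((dd [] cs).filterMap (pairOf cs)).map (fun p => p.2) =
      (dd [] cs).filterMap tcpTable := by
  rw [List.map_filterMap]
  simp [pairOf, Option.map_map]

-- ===== VERDICT (by name: the statement is the Claim_ definition above) =====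
theorem getTcpFlag_spec : Claim_equal_getTcpFlag := by
  intro s _
  show getTcpFlag s = getTcpFlag_alt s
  unfold getTcpFlag getTcpFlag_alt
  rw [tcpLoopA_eq_dd _ _ _ [] (by intro c n _; simp [PySem.Set.contains, PySem.Set.empty])]
  simp only []
  rw [sorted_hits_eq_ys, map_snd_ys]
  simp
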